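-- pv_equiv track=rewrite | github.com/vadim-zyamalov/advent-of-code | 2017/day-20/part1.py | part1
-- ===== SOURCE A (Python) =====
-- def part1(points):
--     minval = float("inf")
--     res = -1
--     for i in range(len(points)):
--         tmp = sum(abs(x) for x in points[i]["a"])
--         if tmp < minval:
--             minval = tmp
--             res = i
--     return res
-- ===== SOURCE B (Python) =====
-- def part1(points):
--     order = sorted(range(len(points)),
--                    key=lambda i: sum(abs(x) for x in points[i]["a"]))
--     return order[0] if order else -1
-- ===== Notes on version B (the rewrite author's own statement) =====
-- stated objective: alternative
-- what changed: Replaces A's fused running-minimum scan by a stable sort of the indices keyed on acceleration magnitude, returning the head of the sorted order (stability gives A's first-minimum tie-break).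
import Mathlib
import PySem

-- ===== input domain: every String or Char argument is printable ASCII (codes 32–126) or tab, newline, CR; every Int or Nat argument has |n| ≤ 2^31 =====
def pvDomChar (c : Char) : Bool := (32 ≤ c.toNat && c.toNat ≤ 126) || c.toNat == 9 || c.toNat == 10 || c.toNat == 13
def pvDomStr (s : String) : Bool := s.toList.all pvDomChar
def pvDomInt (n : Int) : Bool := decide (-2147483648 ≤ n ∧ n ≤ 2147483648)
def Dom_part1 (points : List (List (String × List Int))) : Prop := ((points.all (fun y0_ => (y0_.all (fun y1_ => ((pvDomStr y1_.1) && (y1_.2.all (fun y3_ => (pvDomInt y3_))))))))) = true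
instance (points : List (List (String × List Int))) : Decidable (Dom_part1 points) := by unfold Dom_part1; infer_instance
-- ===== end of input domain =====

-- B replaces A's fused running-minimum scan by a stable sort of the indices by magnitude, taking the head.

-- ===== PORT A =====
-- sum(abs(x) for x in l) as A's running accumulation
def sumAbsA (l : List Int) : Int := l.foldl (fun s x => s + |x|) 0

-- A's loop: minval = float("inf") is modelled by `none` (every Int compares below it),
-- so the first iteration's `tmp < minval` is the `none` branch.
def part1 (points : List (List (String × List Int))) : Int :=
  ((PySem.List.pyRange 0 points.length 1).foldl
    (fun (s : Option Int × Int) i =>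
      let tmp := sumAbsA (((PySem.List.pyGet? points i).bind
        (fun p => PySem.Dict.get? (PySem.Dict.mk p) "a")).getD [])
      match s.1 with
      | none => (some tmp, i)
      | some m => if tmp < m then (some tmp, i) else s)
    (none, -1)).2

-- ===== PORT B =====
-- the sort key: lambda i: sum(abs(x) for x in points[i]["a"])
def keyB (points : List (List (String × List Int))) (i : Int) : Int :=
  ((((PySem.List.pyGet? points i).bind
      (fun p => PySem.Dict.get? (PySem.Dict.mk p) "a")).getD []).map (fun x => |x|)).sum

def part1_alt (points : List (List (String × List Int))) : Int :=
  let order := PySem.List.sorted (PySem.List.pyRange 0 points.length 1) (keyB points) false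
  match order with
  | [] => -1
  | i :: _ => i

-- ===== PRECONDITION & SPEC =====
-- Pre_ excludes points missing the key "a", on which the Python (both A and B) raises KeyError.
def Pre_part1 (points : List (List (String × List Int))) : Prop :=
  ∀ p ∈ points, PySem.Dict.contains (PySem.Dict.mk p) "a" = true
instance (points : List (List (String × List Int))) : Decidable (Pre_part1 points) := by unfold Pre_part1; infer_instance
def pvWitness_part1 : (List (List (String × List Int))) := [[("a", [1, 2])], [("a", [0])]]

def Spec_part1 (points : List (List (String × List Int))) (out : Int) : Prop := out = part1_alt points
instance (points : List (List (String × List Int))) (out : Int) : Decidable (Spec_part1 points out) := by unfold Spec_part1; infer_instance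

-- ===== CLAIM (what is proved, stated in full; the proofs are below) =====
def Claim_equal_part1 : Prop := ∀ (points : List (List (String × List Int))), Dom_part1 points → Pre_part1 points → Spec_part1 points (part1 points)

-- ===== LEMMAS AND PROOFS =====

-- A's generator sum equals B's map-and-sum
theorem sumAbsA_eq (l : List Int) : sumAbsA l = (l.map (fun x => |x|)).sum := by
  simp [sumAbsA, PySem.List.foldl_add]

-- the running first-minimum selection
def runMin (k : Int → Int) (r : Int) (rest : List Int) : Int :=
  rest.foldl (fun r i => if k i < k r then i else r) r

-- A's loop, once started, tracks (some (k r), r) and selects runMin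
theorem loopA_inv (k : Int → Int) (rest : List Int) (r : Int) :
    rest.foldl
      (fun (s : Option Int × Int) i =>
        match s.1 with
        | none => (some (k i), i)
        | some m => if k i < m then (some (k i), i) else s)
      (some (k r), r) = (some (k (runMin k r rest)), runMin k r rest) := by
  induction rest generalizing r with
  | nil => simp [runMin]
  | cons i rest ih =>
    simp only [runMin, List.foldl_cons]
    by_cases h : k i < k r
    · simp only [h, if_true]
      exact ih i
    · simp only [if_neg h]
      exact ih r

-- head of the insertion-sort fold over a nonempty accumulator is the running first-minimum
theorem sortFold_head (k : Int → Int) (rest : List Int) :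
    ∀ (h : Int) (t : List Int), ∃ t',
      rest.foldl (fun acc x => PySem.List.insertBy (fun a b => decide (k a < k b)) x acc) (h :: t)
        = runMin k h rest :: t' := by
  induction rest with
  | nil => intro h t; exact ⟨t, by simp [runMin]⟩
  | cons x rest ih =>
    intro h t
    simp only [List.foldl_cons, PySem.List.insertBy, runMin]
    by_cases hx : k x < k h
    · simp only [decide_eq_true hx, if_pos]
      obtain ⟨t', ht'⟩ := ih x (h :: t)
      exact ⟨t', by simpa [runMin, if_pos hx] using ht'⟩
    · simp only [hx, decide_false, Bool.false_eq_true, if_false]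
      obtain ⟨t', ht'⟩ := ih h (PySem.List.insertBy (fun a b => decide (k a < k b)) x t)
      exact ⟨t', by simpa [runMin, if_neg hx] using ht'⟩

theorem part1_eq (points : List (List (String × List Int))) : part1 points = part1_alt points := by
  by_cases hn : points.length = 0
  · have h0 : PySem.List.pyRange 0 (points.length : Int) 1 = [] := by
      rw [hn]; exact PySem.List.pyRange_one_eq_nil (by norm_num)
    simp [part1, part1_alt, h0, PySem.List.sorted]
  · have hpos : (0 : Int) < (points.length : Int) := by
      have : 0 < points.length := Nat.pos_of_ne_zero hn
      exact_mod_cast this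
    have hr : PySem.List.pyRange 0 (points.length : Int) 1
        = 0 :: PySem.List.pyRange 1 (points.length : Int) 1 :=
      PySem.List.pyRange_one_cons hpos
    set rest := PySem.List.pyRange 1 (points.length : Int) 1 with hrest
    -- A's side
    have hbody : (fun (s : Option Int × Int) (i : Int) =>
        let tmp := sumAbsA (((PySem.List.pyGet? points i).bind
          (fun p => PySem.Dict.get? (PySem.Dict.mk p) "a")).getD [])
        match s.1 with
        | none => (some tmp, i)
        | some m => if tmp < m then (some tmp, i) else s)
        = (fun (s : Option Int × Int) (i : Int) =>
            match s.1 with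
            | none => (some (keyB points i), i)
            | some m => if keyB points i < m then (some (keyB points i), i) else s) := by
      funext s i
      simp only [sumAbsA_eq, keyB]
    have hA : part1 points = runMin (keyB points) 0 rest := by
      unfold part1
      rw [hr, hbody, List.foldl_cons, loopA_inv]
    -- B's side
    have hB : part1_alt points = runMin (keyB points) 0 rest := by
      unfold part1_alt
      rw [hr, PySem.List.sorted_eq_foldl_insertBy, List.foldl_cons]
      obtain ⟨t', ht'⟩ := sortFold_head (keyB points) rest 0 []
      simp only [PySem.List.insertBy]
      rw [ht']
    rw [hA, hB]

-- ===== VERDICT (by name: the statement is the Claim_ definition above) =====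
theorem part1_spec : Claim_equal_part1 := by
  intro points _ _
  exact part1_eq points
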